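-- pv_equiv track=rewrite | github.com/rwrmanns/zotero-obsidian_split_atomic_notes | tac.py | get_previous_heading
-- ===== SOURCE A (Python) =====
-- def get_previous_heading(textblock, pos):
--     """
--     Searches backwards from an absolute character position in the textblock
--     to find the previous higher-level heading or the Note_Title.
--     """
--     # 1. Split text into lines but keep track of their original positions
--     lines = textblock.splitlines(keepends=True)
--
--     current_offset = 0
--     target_line_idx = -1
--
--     # 2. Identify which line index the absolute 'pos' belongs to
--     for i, line in enumerate(lines):
--         line_length = len(line)
--         if current_offset <= pos < current_offset + line_length:
--             target_line_idx = i
--             break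
--         current_offset += line_length
--
--     # Handle case where pos is at the very end of the file
--     if target_line_idx == -1 and pos >= current_offset:
--         target_line_idx = len(lines) - 1
--
--     def get_info(idx):
--         if idx < 0: return None, None
--         line = lines[idx].strip()
--         if line.startswith('#'):
--             level = len(line) - len(line.lstrip('#'))
--             # Validate standard Markdown heading (hashes followed by space)
--             if line.startswith('#' * level + ' '):
--                 return level, line.lstrip('#').strip()
--         return None, None
--
--     # 3. Establish the baseline heading level above the current position
--     baseline_level = 999
--     for i in range(target_line_idx - 1, -1, -1):
--         level, content = get_info(i)
--         if level:
--             baseline_level = level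
--             break
--
--     # 4. Search for the next higher level heading (fewer # symbols)
--     for i in range(target_line_idx - 1, -1, -1):
--         level, content = get_info(i)
--
--         # If we find a heading with a smaller level (e.g., H1 is higher than H2)
--         if level and level < baseline_level:
--             return content
--
--         # If we hit the first line and it's not a heading, it's the Note_Title
--         if i == 0 and level is None:
--             return lines[0].strip()
--
--     return None
-- ===== SOURCE B (Python) =====
-- def _parse_heading(line):
--     """Return (level, content) if the stripped line is a valid '#... ' heading, else None."""
--     s = line.strip()
--     if s.startswith('#'):
--         level = len(s) - len(s.lstrip('#'))
--         if s.startswith('#' * level + ' '):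
--             return level, s.lstrip('#').strip()
--     return None
--
--
-- def get_previous_heading(textblock, pos):
--     lines = textblock.splitlines(keepends=True)
--     if pos < 0:
--         return None
--     # locate the line containing pos (end-of-file fallback: last line)
--     total = 0
--     target = len(lines) - 1
--     for i, ln in enumerate(lines):
--         if pos < total + len(ln):
--             target = i
--             break
--         total += len(ln)
--     if target <= 0:
--         return None
--     # one forward pass: collect (line_index, level, content) for every heading above
--     headings = []
--     for i, ln in enumerate(lines[:target]):
--         h = _parse_heading(ln)
--         if h is not None:
--             headings.append((i, h[0], h[1]))
--     baseline = headings[-1][1] if headings else 999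
--     for _, lvl, content in reversed(headings):
--         if lvl < baseline:
--             return content
--     if headings and headings[0][0] == 0:
--         return None
--     return lines[0].strip()
-- ===== Notes on version B (the rewrite author's own statement) =====
-- stated objective: simpler
-- what changed: B replaces A's two backward index loops that re-parse lines via get_info with one forward pass collecting a (line_index, level, content) heading list, from which baseline and answer are read directly (last element, then a reverse scan).
import Mathlib
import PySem

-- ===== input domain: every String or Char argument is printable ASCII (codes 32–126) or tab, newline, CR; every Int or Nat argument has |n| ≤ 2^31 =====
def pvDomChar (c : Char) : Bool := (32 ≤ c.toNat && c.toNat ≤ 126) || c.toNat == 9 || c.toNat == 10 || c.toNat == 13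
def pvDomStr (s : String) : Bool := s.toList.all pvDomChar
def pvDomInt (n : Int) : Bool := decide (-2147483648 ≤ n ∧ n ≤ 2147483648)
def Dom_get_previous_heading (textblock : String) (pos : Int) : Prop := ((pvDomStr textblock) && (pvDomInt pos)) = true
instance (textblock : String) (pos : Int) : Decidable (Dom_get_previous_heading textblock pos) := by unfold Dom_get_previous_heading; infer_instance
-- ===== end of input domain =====

-- B replaces A's two backward index loops (each re-parsing lines via get_info) with one
-- forward pass collecting a (line_index, level, content) heading list that is then read
-- directly (objective: simpler). Both ports share pvSplitKeep = splitlines(keepends=True),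
-- exact for the domain's line breaks '\n', '\r', '\r\n'.

-- splitlines(keepends=True), hand-ported (PySem has no keepends variant); exact on Dom
def pvSplitKeep (cur : List Char) : List Char → List (List Char)
  | [] => if cur = [] then [] else [cur.reverse]
  | '\r' :: '\n' :: rest => (cur.reverse ++ ['\r', '\n']) :: pvSplitKeep [] rest
  | '\r' :: rest => (cur.reverse ++ ['\r']) :: pvSplitKeep [] rest
  | '\n' :: rest => (cur.reverse ++ ['\n']) :: pvSplitKeep [] rest
  | c :: rest => pvSplitKeep (c :: cur) rest

-- ===== PORT A =====
-- get_info(idx): strip the line, count leading '#', validate '#'*level + ' '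
def pvGetInfo (lines : List (List Char)) (idx : Int) : Option (Nat × List Char) :=
  if idx < 0 then none
  else
    match PySem.List.pyGet? lines idx with
    | none => none
    | some l0 =>
      let line := PySem.Chars.strip l0
      if PySem.Chars.startswith line ['#'] then
        let rest := line.dropWhile (fun c => c == '#')   -- line.lstrip('#')
        let level := line.length - rest.length
        if PySem.Chars.startswith line (List.replicate level '#' ++ [' ']) then
          some (level, PySem.Chars.strip rest)
        else none
      else none

-- step 2 of A: locate pos's line; returns (target_line_idx, current_offset)
def pvLocLoop (pos : Int) : Nat → Int → List (List Char) → Int × Int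
  | _, off, [] => (-1, off)
  | i, off, l :: rest =>
    if off ≤ pos ∧ pos < off + (l.length : Int) then ((i : Int), off)
    else pvLocLoop pos (i + 1) (off + (l.length : Int)) rest

-- step 3 of A: 'for i in range(t-1, -1, -1)' ported as Nat recursion on t (k+1 visits index k)
def pvBaseLoop (lines : List (List Char)) : Nat → Nat
  | 0 => 999
  | k + 1 =>
    match pvGetInfo lines (k : Int) with
    | some (level, _) => if level ≠ 0 then level else pvBaseLoop lines k
    | none => pvBaseLoop lines k

-- step 4 of A, same descending range
def pvSearchLoop (lines : List (List Char)) (baseline : Nat) : Nat → Option (List Char)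
  | 0 => none
  | k + 1 =>
    match pvGetInfo lines (k : Int) with
    | some (level, content) =>
      if level ≠ 0 ∧ level < baseline then some content
      else pvSearchLoop lines baseline k
    | none =>
      if k = 0 then (PySem.List.pyGet? lines 0).map PySem.Chars.strip
      else pvSearchLoop lines baseline k

def get_previous_heading (textblock : String) (pos : Int) : Option String :=
  let lines := pvSplitKeep [] textblock.toList
  let r := pvLocLoop pos 0 0 lines
  let target : Int := if r.1 = -1 ∧ r.2 ≤ pos then (lines.length : Int) - 1 else r.1
  let baseline := pvBaseLoop lines target.toNat
  (pvSearchLoop lines baseline target.toNat).map String.mk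

-- ===== PORT B =====
-- _parse_heading of Source B
def pvParseHeading (line : List Char) : Option (Nat × List Char) :=
  let s := PySem.Chars.strip line
  if PySem.Chars.startswith s ['#'] then
    let t := s.dropWhile (fun c => c == '#')   -- s.lstrip('#')
    let level := s.length - t.length
    if PySem.Chars.startswith s (List.replicate level '#' ++ [' ']) then
      some (level, PySem.Chars.strip t)
    else none
  else none

-- B's forward locate loop ('break' → some i; for-else handled by the caller)
def pvAltLoc (pos : Int) : Nat → Int → List (List Char) → Option Nat
  | _, _, [] => none
  | i, total, l :: rest =>
    if pos < total + (l.length : Int) then some i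
    else pvAltLoc pos (i + 1) (total + (l.length : Int)) rest

-- B's single forward pass collecting (line_index, level, content)
def pvAltHeads (i : Nat) : List (List Char) → List (Nat × Nat × List Char)
  | [] => []
  | l :: rest =>
    match pvParseHeading l with
    | some (lvl, c) => (i, lvl, c) :: pvAltHeads (i + 1) rest
    | none => pvAltHeads (i + 1) rest

def get_previous_heading_alt (textblock : String) (pos : Int) : Option String :=
  let lines := pvSplitKeep [] textblock.toList
  if pos < 0 then none
  else
    let target : Int :=
      match pvAltLoc pos 0 0 lines with
      | some i => (i : Int)
      | none => (lines.length : Int) - 1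
    if target ≤ 0 then none
    else
      let headings := pvAltHeads 0 (lines.take target.toNat)
      let baseline :=
        match headings.getLast? with
        | some (_, lvl, _) => lvl
        | none => 999
      match headings.reverse.find? (fun p => decide (p.2.1 < baseline)) with
      | some (_, _, c) => some (String.mk c)
      | none =>
        match headings.head? with
        | some (i, _, _) =>
          if i = 0 then none
          else (PySem.List.pyGet? lines 0).map (fun l => String.mk (PySem.Chars.strip l))
        | none => (PySem.List.pyGet? lines 0).map (fun l => String.mk (PySem.Chars.strip l))

-- ===== PRECONDITION & SPEC =====
def Spec_get_previous_heading (textblock : String) (pos : Int) (out : Option String) : Prop := out = get_previous_heading_alt textblock pos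
instance (textblock : String) (pos : Int) (out : Option String) : Decidable (Spec_get_previous_heading textblock pos out) := by unfold Spec_get_previous_heading; infer_instance

-- ===== CLAIM (what is proved, stated in full; the proofs are below) =====
def Claim_equal_get_previous_heading : Prop := ∀ (textblock : String) (pos : Int), Dom_get_previous_heading textblock pos → Spec_get_previous_heading textblock pos (get_previous_heading textblock pos)

-- ===== LEMMAS AND PROOFS =====

theorem pv_parse_pos (l : List Char) (lvl : Nat) (c : List Char)
    (h : pvParseHeading l = some (lvl, c)) : 0 < lvl := by
  unfold pvParseHeading at h
  set s := PySem.Chars.strip l with hs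
  by_cases h1 : PySem.Chars.startswith s ['#'] = true
  · rw [if_pos h1] at h
    have hpre : ['#'] <+: s := (PySem.Chars.startswith_iff _ _).mp h1
    obtain ⟨s', hs'⟩ := hpre
    by_cases h2 : PySem.Chars.startswith s
        (List.replicate (s.length - (s.dropWhile (fun c => c == '#')).length) '#' ++ [' ']) = true
    · rw [if_pos h2] at h
      have hle : (s.dropWhile (fun c => c == '#')).length ≤ s'.length := by
        rw [← hs']
        simp [List.dropWhile]
        exact List.length_dropWhile_le _ _
      have hlen : s.length = s'.length + 1 := by rw [← hs']; simp
      obtain ⟨h3, _⟩ := Option.some.injEq _ _ ▸ h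
      omega
    · rw [if_neg h2] at h; exact absurd h (by simp)
  · rw [if_neg h1] at h; exact absurd h (by simp)

theorem pv_getInfo_eq (lines : List (List Char)) (k : Nat) (h : k < lines.length) :
    pvGetInfo lines (k : Int) = pvParseHeading lines[k] := by
  unfold pvGetInfo pvParseHeading
  rw [if_neg (by omega)]
  rw [PySem.List.pyGet?_natCast, List.getElem?_eq_getElem h]

theorem pv_heads_append (xs : List (List Char)) (x : List Char) :
    ∀ i, pvAltHeads i (xs ++ [x]) = pvAltHeads i xs ++
      (match pvParseHeading x with
       | some (lvl, c) => [(i + xs.length, lvl, c)]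
       | none => []) := by
  induction xs with
  | nil =>
    intro i
    cases hp : pvParseHeading x with
    | none => simp [pvAltHeads, hp]
    | some p => obtain ⟨lvl, c⟩ := p; simp [pvAltHeads, hp]
  | cons y ys ih =>
    intro i
    simp only [List.cons_append, pvAltHeads]
    have hidx : ∀ m : Nat, m + 1 + ys.length = m + (y :: ys).length := by
      intro m; simp [List.length_cons]; omega
    cases hp : pvParseHeading y with
    | none =>
      rw [ih (i + 1)]
      cases hx : pvParseHeading x with
      | none => rfl
      | some q => obtain ⟨lvl, c⟩ := q; rw [hidx i]
    | some p =>
      obtain ⟨lvl0, c0⟩ := p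
      rw [ih (i + 1), List.cons_append]
      cases hx : pvParseHeading x with
      | none => rfl
      | some q => obtain ⟨lvl, c⟩ := q; rw [hidx i]

theorem pv_heads_take_succ (lines : List (List Char)) (k : Nat) (h : k < lines.length) :
    pvAltHeads 0 (lines.take (k + 1)) = pvAltHeads 0 (lines.take k) ++
      (match pvParseHeading lines[k] with
       | some (lvl, c) => [(k, lvl, c)]
       | none => []) := by
  rw [List.take_succ, List.getElem?_eq_getElem h]
  simp only [Option.toList_some]
  rw [pv_heads_append]
  congr 1
  have hlen : (lines.take k).length = k := by simp [Nat.le_of_lt h]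
  cases hp : pvParseHeading lines[k] with
  | none => rfl
  | some p => cases p; simp [hlen]

theorem pv_base_eq (lines : List (List Char)) :
    ∀ k, k ≤ lines.length →
      pvBaseLoop lines k =
        (match (pvAltHeads 0 (lines.take k)).getLast? with
         | some p => p.2.1
         | none => 999) := by
  intro k
  induction k with
  | zero => intro _; simp [pvBaseLoop, pvAltHeads]
  | succ k ih =>
    intro hk
    have hk' : k < lines.length := by omega
    rw [pvBaseLoop, pv_getInfo_eq lines k hk', pv_heads_take_succ lines k hk']
    cases hp : pvParseHeading lines[k] with
    | none => simp only [List.append_nil]; exact ih (by omega)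
    | some p =>
      obtain ⟨lvl, c⟩ := p
      have := pv_parse_pos _ _ _ hp
      dsimp only
      rw [List.getLast?_concat, if_pos (by omega)]

theorem pv_search_eq (lines : List (List Char)) (b : Nat) :
    ∀ k, k ≤ lines.length →
      pvSearchLoop lines b k =
        (match (pvAltHeads 0 (lines.take k)).reverse.find? (fun p => decide (p.2.1 < b)) with
         | some p => some p.2.2
         | none =>
           match k with
           | 0 => none
           | _ + 1 =>
             match (pvAltHeads 0 (lines.take k)).head? with
             | some (i, _, _) =>
               if i = 0 then none
               else (PySem.List.pyGet? lines 0).map PySem.Chars.strip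
             | none => (PySem.List.pyGet? lines 0).map PySem.Chars.strip) := by
  intro k
  induction k with
  | zero => intro _; simp [pvSearchLoop, pvAltHeads]
  | succ k ih =>
    intro hk
    have hk' : k < lines.length := by omega
    rw [pvSearchLoop, pv_getInfo_eq lines k hk', pv_heads_take_succ lines k hk']
    cases hp : pvParseHeading lines[k] with
    | none =>
      simp only [List.append_nil]
      by_cases hk0 : k = 0
      · subst hk0
        simp [pvAltHeads]
      · rw [if_neg hk0, ih (by omega)]
        cases hf : (pvAltHeads 0 (lines.take k)).reverse.find? (fun p => decide (p.2.1 < b)) with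
        | some p => rfl
        | none =>
          obtain ⟨k', rfl⟩ := Nat.exists_eq_succ_of_ne_zero hk0
          rfl
    | some p =>
      obtain ⟨lvl, c⟩ := p
      have hpos := pv_parse_pos _ _ _ hp
      rw [List.reverse_append]
      simp only [List.reverse_singleton, List.singleton_append, List.find?_cons]
      by_cases hlt : lvl < b
      · rw [if_pos ⟨by omega, hlt⟩]
        simp [hlt]
      · rw [if_neg (by omega)]
        have hdec : (decide ((k, lvl, c).2.1 < b)) = false := by simp [hlt]
        rw [hdec, ih (by omega)]
        cases hf : (pvAltHeads 0 (lines.take k)).reverse.find? (fun p => decide (p.2.1 < b)) with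
        | some p => rfl
        | none =>
          cases hh : pvAltHeads 0 (lines.take k) with
          | nil =>
            have hk0 : ¬ (k = 0) ∨ k = 0 := by omega
            cases hk0 with
            | inr h0 => subst h0; simp
            | inl h0 =>
              obtain ⟨k', rfl⟩ := Nat.exists_eq_succ_of_ne_zero h0
              simp only [List.nil_append, List.head?_cons]
              rw [if_neg (by omega)]
              rfl
          | cons q qs =>
            obtain ⟨qi, qlvl, qc⟩ := q
            cases k with
            | zero => simp [pvAltHeads] at hh
            | succ k' => simp only [List.cons_append, List.head?_cons]

theorem pv_altLoc_bounds (pos : Int) :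
    ∀ (ls : List (List Char)) (i : Nat) (off : Int) (j : Nat),
      pvAltLoc pos i off ls = some j → i ≤ j ∧ j < i + ls.length := by
  intro ls
  induction ls with
  | nil => intro i off j h; simp [pvAltLoc] at h
  | cons l rest ih =>
    intro i off j h
    rw [pvAltLoc] at h
    split at h
    · obtain rfl := Option.some.injEq _ _ ▸ h
      simp only [List.length_cons]
      omega
    · have := ih (i + 1) _ j h
      simp at this ⊢
      omega

theorem pv_loc_neg (pos : Int) (hpos : pos < 0) :
    ∀ (ls : List (List Char)) (i : Nat) (off : Int), 0 ≤ off →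
      (pvLocLoop pos i off ls).1 = -1 ∧ 0 ≤ (pvLocLoop pos i off ls).2 := by
  intro ls
  induction ls with
  | nil => intro i off h; simp [pvLocLoop, h]
  | cons l rest ih =>
    intro i off hoff
    rw [pvLocLoop, if_neg (by omega)]
    exact ih (i + 1) _ (by positivity)

theorem pv_loc_agree (pos : Int) :
    ∀ (ls : List (List Char)) (i : Nat) (off : Int), off ≤ pos →
      (∀ j, pvAltLoc pos i off ls = some j → (pvLocLoop pos i off ls).1 = (j : Int)) ∧
      (pvAltLoc pos i off ls = none →
        (pvLocLoop pos i off ls).1 = -1 ∧ (pvLocLoop pos i off ls).2 ≤ pos) := by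
  intro ls
  induction ls with
  | nil =>
    intro i off h
    refine ⟨fun j hj => by simp [pvAltLoc] at hj, fun _ => ⟨rfl, h⟩⟩
  | cons l rest ih =>
    intro i off hoff
    constructor
    · intro j hj
      rw [pvAltLoc] at hj
      rw [pvLocLoop]
      split at hj
      · obtain rfl := Option.some.injEq _ _ ▸ hj
        rw [if_pos ⟨hoff, by assumption⟩]
      · rename_i hc
        rw [if_neg (by omega)]
        exact (ih (i + 1) _ (by omega)).1 j hj
    · intro hn
      rw [pvAltLoc] at hn
      rw [pvLocLoop]
      split at hn
      · exact absurd hn (by simp)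
      · rename_i hc
        rw [if_neg (by omega)]
        exact (ih (i + 1) _ (by omega)).2 hn

-- the whole computation, for n = target.toNat with 1 ≤ n ≤ lines.length, aligned branch by branch
theorem pv_main_pos (lines : List (List Char)) (n : Nat) (h1 : 1 ≤ n) (hn : n ≤ lines.length) :
    (pvSearchLoop lines (pvBaseLoop lines n) n).map String.mk =
      (match (pvAltHeads 0 (lines.take n)).reverse.find? (fun p => decide (p.2.1 <
          (match (pvAltHeads 0 (lines.take n)).getLast? with
           | some (_, lvl, _) => lvl
           | none => 999))) with
       | some (_, _, c) => some (String.mk c)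
       | none =>
         match (pvAltHeads 0 (lines.take n)).head? with
         | some (i, _, _) =>
           if i = 0 then none
           else (PySem.List.pyGet? lines 0).map (fun l => String.mk (PySem.Chars.strip l))
         | none => (PySem.List.pyGet? lines 0).map (fun l => String.mk (PySem.Chars.strip l))) := by
  have hb : pvBaseLoop lines n =
      (match (pvAltHeads 0 (lines.take n)).getLast? with
       | some p => p.2.1
       | none => 999) := pv_base_eq lines n hn
  have hbl : (match (pvAltHeads 0 (lines.take n)).getLast? with
       | some p => p.2.1
       | none => (999 : Nat)) =
      (match (pvAltHeads 0 (lines.take n)).getLast? with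
       | some (_, lvl, _) => lvl
       | none => (999 : Nat)) := by
    cases hg : (pvAltHeads 0 (lines.take n)).getLast? with
    | none => rfl
    | some p => obtain ⟨a, b, c⟩ := p; rfl
  rw [pv_search_eq lines _ n hn, hb, hbl]
  set bl := (match (pvAltHeads 0 (lines.take n)).getLast? with
       | some (_, lvl, _) => lvl
       | none => (999 : Nat)) with hbldef
  cases hf : (pvAltHeads 0 (lines.take n)).reverse.find? (fun p => decide (p.2.1 < bl)) with
  | some p => obtain ⟨a, b, c⟩ := p; rfl
  | none =>
    obtain ⟨m, rfl⟩ := Nat.exists_eq_succ_of_ne_zero (by omega : n ≠ 0)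
    cases hh : (pvAltHeads 0 (lines.take (m + 1))).head? with
    | none =>
      simp only [Option.map_map]
      rfl
    | some q =>
      obtain ⟨i, lvl, c⟩ := q
      by_cases hi : i = 0
      · simp [hi]
      · simp only [hi, if_false, Option.map_map]
        rfl

theorem pv_main (lines : List (List Char)) (pos : Int) :
    (pvSearchLoop lines
        (pvBaseLoop lines
          (if (pvLocLoop pos 0 0 lines).1 = -1 ∧ (pvLocLoop pos 0 0 lines).2 ≤ pos
            then (lines.length : Int) - 1 else (pvLocLoop pos 0 0 lines).1).toNat)
        (if (pvLocLoop pos 0 0 lines).1 = -1 ∧ (pvLocLoop pos 0 0 lines).2 ≤ pos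
          then (lines.length : Int) - 1 else (pvLocLoop pos 0 0 lines).1).toNat).map String.mk =
    (if pos < 0 then none
     else
       if ((match pvAltLoc pos 0 0 lines with
           | some i => (i : Int)
           | none => (lines.length : Int) - 1) : Int) ≤ (0 : Int) then none
       else
         match (pvAltHeads 0 (lines.take (Int.toNat (match pvAltLoc pos 0 0 lines with
             | some i => (i : Int)
             | none => (lines.length : Int) - 1)))).reverse.find? (fun p => decide (p.2.1 <
           (match (pvAltHeads 0 (lines.take (Int.toNat (match pvAltLoc pos 0 0 lines with
               | some i => (i : Int)
               | none => (lines.length : Int) - 1)))).getLast? with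
            | some (_, lvl, _) => lvl
            | none => 999))) with
         | some (_, _, c) => some (String.mk c)
         | none =>
           match (pvAltHeads 0 (lines.take (Int.toNat (match pvAltLoc pos 0 0 lines with
               | some i => (i : Int)
               | none => (lines.length : Int) - 1)))).head? with
           | some (i, _, _) =>
             if i = 0 then none
             else (PySem.List.pyGet? lines 0).map (fun l => String.mk (PySem.Chars.strip l))
           | none => (PySem.List.pyGet? lines 0).map (fun l => String.mk (PySem.Chars.strip l))) := by
  by_cases hpos : pos < 0
  · obtain ⟨hfst, hsnd⟩ := pv_loc_neg pos hpos lines 0 0 le_rfl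
    have hcond : ¬ ((pvLocLoop pos 0 0 lines).1 = -1 ∧ (pvLocLoop pos 0 0 lines).2 ≤ pos) := by
      rintro ⟨_, h2⟩; omega
    rw [if_pos hpos, if_neg hcond, hfst]
    rfl
  · rw [if_neg hpos]
    have hge : (0 : Int) ≤ pos := by omega
    obtain ⟨hsome, hnone⟩ := pv_loc_agree pos lines 0 0 hge
    cases hloc : pvAltLoc pos 0 0 lines with
    | some j =>
      have hfst := hsome j hloc
      have hbnd := pv_altLoc_bounds pos lines 0 0 j hloc
      have hcond : ¬ ((pvLocLoop pos 0 0 lines).1 = -1 ∧ (pvLocLoop pos 0 0 lines).2 ≤ pos) := by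
        rintro ⟨h1, _⟩; rw [hfst] at h1; omega
      dsimp only
      rw [if_neg hcond, hfst]
      by_cases hj : j = 0
      · subst hj
        rw [if_pos (by norm_num)]
        norm_num [pvSearchLoop]
      · rw [if_neg (by omega)]
        have ht : ((j : Int)).toNat = j := by omega
        rw [ht]
        exact pv_main_pos lines j (by omega) (by simp at hbnd; omega)
    | none =>
      obtain ⟨hfst, hsnd⟩ := hnone hloc
      dsimp only
      rw [if_pos ⟨hfst, hsnd⟩]
      by_cases hlen : lines.length ≤ 1
      · rw [if_pos (by omega)]
        have ht : ((lines.length : Int) - 1).toNat = 0 := by omega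
        rw [ht]
        rfl
      · rw [if_neg (by omega)]
        have ht : ((lines.length : Int) - 1).toNat = lines.length - 1 := by omega
        rw [ht]
        exact pv_main_pos lines (lines.length - 1) (by omega) (by omega)

-- ===== VERDICT (by name: the statement is the Claim_ definition above) =====
theorem get_previous_heading_spec : Claim_equal_get_previous_heading := by
  intro textblock pos _
  unfold Spec_get_previous_heading get_previous_heading get_previous_heading_alt
  exact pv_main (pvSplitKeep [] textblock.toList) pos
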